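-- pv_equiv track=rewrite | github.com/mattbierbaum/arxiv-public-datasets | arxiv_public_data/authors.py | _parse_author_affil_back_propagate
-- ===== SOURCE A (Python) =====
-- from typing import Dict, Iterator, List, Tuple
--
-- def _parse_author_affil_back_propagate(author_list: List[List[str]],
--                                        back_prop: int) -> List[List[str]]:
--     """Back propagate author affiliation.
--
--     Take the author list structure generated by parse_author_affil_split(..)
--     and propagate affiliation information backwards to preceeding author
--     entries where none was give. Stop before entry $back_prop to avoid
--     adding affiliation information to collaboration names.
--
--     given, eg:
--       a.b.first, c.d.second (affil)
--     implies
--       a.b.first (affil), c.d.second (affil)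
--     and in more complex cases:
--       a.b.first, c.d.second (1), e.f.third, g.h.forth (2,3)
--     implies
--       a.b.first (1), c.d.second (1), e.f.third (2,3), g.h.forth (2,3)
--     """
--     last_affil: List[str] = []
--     for x in range(len(author_list) - 1, max(back_prop - 1, -1), -1):
--         author_entry = author_list[x]
--         if len(author_entry) > 3:  # author has affiliation,store
--             last_affil = author_entry
--         elif last_affil:
--             # author doesn't have affil but later one did => copy
--             author_entry.extend(last_affil[3:])
--
--     return author_list
-- ===== SOURCE B (Python) =====
-- from typing import List
--
-- def _parse_author_affil_back_propagate(author_list: List[List[str]],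
--                                        back_prop: int) -> List[List[str]]:
--     """Forward pass: collect entries lacking affiliation in `pending`; when an
--     entry with affiliation appears, extend every pending entry with it."""
--     pending: List[List[str]] = []
--     for x in range(max(back_prop, 0), len(author_list)):
--         entry = author_list[x]
--         if len(entry) > 3:
--             affil = entry[3:]
--             for p in pending:
--                 p.extend(affil)
--             pending = []
--         else:
--             pending.append(entry)
--     return author_list
-- ===== Notes on version B (the rewrite author's own statement) =====
-- stated objective: alternative
-- what changed: Replaces A's backward index loop carrying a last-seen affiliation with a forward pass over the entries that collects affiliation-less entries in a pending list and extends them all when the next affiliated entry appears.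
import Mathlib
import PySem

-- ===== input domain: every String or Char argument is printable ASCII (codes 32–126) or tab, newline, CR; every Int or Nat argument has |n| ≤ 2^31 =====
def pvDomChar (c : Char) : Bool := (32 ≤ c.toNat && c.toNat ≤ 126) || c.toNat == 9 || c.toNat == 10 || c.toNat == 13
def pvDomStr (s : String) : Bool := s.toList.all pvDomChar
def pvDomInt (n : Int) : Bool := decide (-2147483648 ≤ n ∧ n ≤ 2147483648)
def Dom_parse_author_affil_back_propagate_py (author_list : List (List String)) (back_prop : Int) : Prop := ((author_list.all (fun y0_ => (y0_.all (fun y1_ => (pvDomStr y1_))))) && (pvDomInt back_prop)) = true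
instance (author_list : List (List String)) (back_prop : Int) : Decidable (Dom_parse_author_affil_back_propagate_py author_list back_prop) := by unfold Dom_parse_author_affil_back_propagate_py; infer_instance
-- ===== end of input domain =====

-- B replaces A's backward index loop with a forward pass keeping a `pending` list of
-- affiliation-less entries (objective: alternative decomposition, same cost).
-- Both Pythons mutate the entries of `author_list` in place and return the same list
-- object; the equivalence proved here is about the returned value.

-- ===== PORT A =====
-- loop body of A: state = (author_list, last_affil); author_list[x] ported with
-- pyGet? (always in range on the indices the loop visits, so the default is never used)
def stepA (st : List (List String) × List String) (x : Int) :
    List (List String) × List String :=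
  let author_entry := (PySem.List.pyGet? st.1 x).getD []
  if 3 < author_entry.length then (st.1, author_entry)
  else if st.2 ≠ [] then (st.1.set x.toNat (author_entry ++ st.2.drop 3), st.2)
  else st

def parse_author_affil_back_propagate_py (author_list : List (List String)) (back_prop : Int) : List (List String) :=
  ((PySem.List.pyRange ((author_list.length : Int) - 1) (max (back_prop - 1) (-1)) (-1)).foldl
      stepA (author_list, ([] : List String))).1

-- ===== PORT B =====
-- forward pass of Source B: `pending` collects entries without affiliation; an entry with
-- one extends all pending entries
def goB : List (List String) → List (List String) → List (List String)
  | [], pending => pending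
  | e :: rest, pending =>
    if 3 < e.length then pending.map (fun p => p ++ e.drop 3) ++ e :: goB rest []
    else goB rest (pending ++ [e])

def parse_author_affil_back_propagate_py_alt (author_list : List (List String)) (back_prop : Int) : List (List String) :=
  let start := (max back_prop 0).toNat
  author_list.take start ++ goB (author_list.drop start) []

-- ===== PRECONDITION & SPEC =====
def Spec_parse_author_affil_back_propagate_py (author_list : List (List String)) (back_prop : Int) (out : List (List String)) : Prop := out = parse_author_affil_back_propagate_py_alt author_list back_prop
instance (author_list : List (List String)) (back_prop : Int) (out : List (List String)) : Decidable (Spec_parse_author_affil_back_propagate_py author_list back_prop out) := by unfold Spec_parse_author_affil_back_propagate_py; infer_instance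

-- ===== CLAIM (what is proved, stated in full; the proofs are below) =====
def Claim_equal_parse_author_affil_back_propagate_py : Prop := ∀ (author_list : List (List String)) (back_prop : Int), Dom_parse_author_affil_back_propagate_py author_list back_prop → Spec_parse_author_affil_back_propagate_py author_list back_prop (parse_author_affil_back_propagate_py author_list back_prop)

-- ===== LEMMAS AND PROOFS =====

-- right-to-left reference pass on a suffix: (processed suffix, last_affil collected)
def auxA : List (List String) → List (List String) × List String
  | [] => ([], [])
  | e :: rest =>
    let r := auxA rest
    if 3 < e.length then (e :: r.1, e)
    else if r.2 ≠ [] then ((e ++ r.2.drop 3) :: r.1, r.2)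
    else (e :: r.1, r.2)

theorem goB_aux (s : List (List String)) : ∀ pending,
    goB s pending =
      pending.map (fun p => if (auxA s).2 = [] then p else p ++ (auxA s).2.drop 3)
        ++ (auxA s).1 := by
  induction s with
  | nil => intro pending; simp [goB, auxA]
  | cons e rest ih =>
    intro pending
    by_cases h : 3 < e.length
    · have hne : e ≠ [] := by
        intro hnil; rw [hnil] at h; simp at h
      simp [goB, auxA, h, hne, ih]
    · simp only [goB, auxA, if_neg h, ih (pending ++ [e]), List.map_append]
      by_cases hla : (auxA rest).2 = [] <;> simp [hla]

theorem pyRange_neg_one_snoc (a b : Int) (h : b ≤ a) :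
    PySem.List.pyRange a (b - 1) (-1) = PySem.List.pyRange a b (-1) ++ [b] := by
  rw [PySem.List.pyRange_neg_one_eq_reverse, PySem.List.pyRange_neg_one_eq_reverse]
  rw [show b - 1 + 1 = b by ring]
  rw [PySem.List.pyRange_one_cons (by omega : b < a + 1)]
  simp

theorem set_append_cons (p : List (List String)) (e v : List String) (t : List (List String)) :
    (p ++ e :: t).set p.length v = p ++ v :: t := by
  induction p with
  | nil => simp
  | cons x xs ih => simp [ih]

theorem foldA (s : List (List String)) : ∀ (p : List (List String)),
    (PySem.List.pyRange ((p.length : Int) + s.length - 1) ((p.length : Int) - 1) (-1)).foldl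
        stepA (p ++ s, ([] : List String)) = (p ++ (auxA s).1, (auxA s).2) := by
  induction s with
  | nil =>
    intro p
    rw [PySem.List.pyRange_neg_one_eq_nil (by simp)]
    simp [auxA]
  | cons e rest ih =>
    intro p
    have hb : ((p.length : Int)) ≤ (p.length : Int) + (e :: rest).length - 1 := by
      simp
    rw [show ((p.length : Int) - 1) = ((p.length : Int)) - 1 from rfl,
        pyRange_neg_one_snoc _ _ hb, List.foldl_append]
    have hre : p ++ e :: rest = (p ++ [e]) ++ rest := by simp
    have harg : (PySem.List.pyRange ((p.length : Int) + (e :: rest).length - 1)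
          ((p.length : Int)) (-1)) =
        (PySem.List.pyRange (((p ++ [e]).length : Int) + rest.length - 1)
          (((p ++ [e]).length : Int) - 1) (-1)) := by
      congr 1 <;> (simp; try omega)
    rw [hre, harg, ih (p ++ [e])]
    have hget : (PySem.List.pyGet? ((p ++ [e]) ++ (auxA rest).1) ((p.length : Int))).getD []
        = e := by
      have : (p ++ [e]) ++ (auxA rest).1 = p ++ e :: (auxA rest).1 := by simp
      rw [this, PySem.List.pyGet?_append_length]
      rfl
    show stepA ((p ++ [e]) ++ (auxA rest).1, (auxA rest).2) (p.length : Int) = _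
    unfold stepA
    simp only [hget]
    by_cases h : 3 < e.length
    · simp [auxA, h]
    · by_cases hla : (auxA rest).2 = []
      · simp [auxA, h, hla]
      · simp only [auxA, if_neg h, hla, ne_eq, not_false_eq_true, if_pos]
        rw [Int.toNat_natCast]
        rw [show (p ++ [e]) ++ (auxA rest).1 = p ++ e :: (auxA rest).1 by simp,
            set_append_cons]

-- ===== VERDICT (by name: the statement is the Claim_ definition above) =====
theorem parse_author_affil_back_propagate_py_spec : Claim_equal_parse_author_affil_back_propagate_py := by
  intro author_list back_prop _
  unfold Spec_parse_author_affil_back_propagate_py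
  unfold parse_author_affil_back_propagate_py parse_author_affil_back_propagate_py_alt
  set m := (max back_prop 0).toNat with hm
  by_cases h : m ≤ author_list.length
  · have hsplit : author_list = author_list.take m ++ author_list.drop m := by simp
    have hlen : ((author_list.take m).length : Int) = (m : Int) := by
      simp [List.length_take, Nat.min_eq_left h]
    have hbounds : (PySem.List.pyRange ((author_list.length : Int) - 1)
          (max (back_prop - 1) (-1)) (-1)) =
        (PySem.List.pyRange (((author_list.take m).length : Int) + (author_list.drop m).length - 1)
          (((author_list.take m).length : Int) - 1) (-1)) := by
      congr 1
      · rw [hlen]; simp [List.length_drop]; omega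
      · rw [hlen]; omega
    conv_lhs =>
      rw [hbounds,
        show (author_list, ([] : List String)) =
            (List.take m author_list ++ List.drop m author_list, ([] : List String)) from by
          rw [List.take_append_drop]]
    rw [foldA]
    simp [goB_aux]
  · -- start beyond the list: the loop range is empty, B keeps the whole list
    have hle : (author_list.length : Int) - 1 ≤ max (back_prop - 1) (-1) := by omega
    rw [PySem.List.pyRange_neg_one_eq_nil hle]
    have h1 : author_list.take m = author_list := List.take_of_length_le (by omega)
    have h2 : author_list.drop m = [] := List.drop_eq_nil_of_le (by omega)
    simp [h1, h2, goB]
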